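-- pv_equiv track=rewrite | github.com/pypi-data/pypi-mirror-361 | packages/infradsl/infradsl-0.1.4-py3-none-any.whl/infradsl/core/network_intelligence.py | _sort_regions_geographically
-- ===== SOURCE A (Python) =====
-- from typing import Dict, Any, List, Optional, Tuple, Union, Set
--
-- def _sort_regions_geographically(regions: List[str], provider: str) -> List[str]:
--     """Sort regions by geographic proximity"""
--
--     # Simplified geographic grouping - in production would use actual coordinates
--     geographic_groups = {
--         "aws": {
--             "us": ["us-east-1", "us-east-2", "us-west-1", "us-west-2"],
--             "eu": ["eu-west-1", "eu-west-2", "eu-central-1"],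
--             "ap": ["ap-southeast-1", "ap-southeast-2", "ap-northeast-1"]
--         },
--         "gcp": {
--             "us": ["us-central1", "us-east1", "us-west1"],
--             "eu": ["europe-west1", "europe-west2", "europe-west3"],
--             "asia": ["asia-southeast1", "asia-northeast1"]
--         }
--     }
--
--     provider_groups = geographic_groups.get(provider, {})
--     sorted_regions = []
--
--     # Group regions geographically
--     for group_regions in provider_groups.values():
--         for region in regions:
--             if region in group_regions and region not in sorted_regions:
--                 sorted_regions.append(region)
--
--     # Add any remaining regions
--     for region in regions:
--         if region not in sorted_regions:
--             sorted_regions.append(region)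
--
--     return sorted_regions
-- ===== SOURCE B (Python) =====
-- def _sort_regions_geographically(regions, provider):
--     """Sort regions by geographic proximity"""
--
--     geographic_groups = {
--         "aws": {
--             "us": ["us-east-1", "us-east-2", "us-west-1", "us-west-2"],
--             "eu": ["eu-west-1", "eu-west-2", "eu-central-1"],
--             "ap": ["ap-southeast-1", "ap-southeast-2", "ap-northeast-1"]
--         },
--         "gcp": {
--             "us": ["us-central1", "us-east1", "us-west1"],
--             "eu": ["europe-west1", "europe-west2", "europe-west3"],
--             "asia": ["asia-southeast1", "asia-northeast1"]
--         }
--     }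
--
--     groups = list(geographic_groups.get(provider, {}).values())
--     rank = {r: i for i, grp in enumerate(groups) for r in grp}
--     nb = len(groups)
--     buckets = [[] for _ in range(nb + 1)]
--     seen = set()
--     for r in regions:
--         if r not in seen:
--             seen.add(r)
--             buckets[rank.get(r, nb)].append(r)
--     return [r for b in buckets for r in b]
-- ===== Notes on version B (the rewrite author's own statement) =====
-- stated objective: faster
-- what changed: Replaces the per-group rescans of regions (and the list membership test against the growing output) by a precomputed region-to-group-rank dict and one single pass over regions that drops duplicates with a set and distributes each region into its rank bucket, then concatenates the buckets.
import Mathlib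
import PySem

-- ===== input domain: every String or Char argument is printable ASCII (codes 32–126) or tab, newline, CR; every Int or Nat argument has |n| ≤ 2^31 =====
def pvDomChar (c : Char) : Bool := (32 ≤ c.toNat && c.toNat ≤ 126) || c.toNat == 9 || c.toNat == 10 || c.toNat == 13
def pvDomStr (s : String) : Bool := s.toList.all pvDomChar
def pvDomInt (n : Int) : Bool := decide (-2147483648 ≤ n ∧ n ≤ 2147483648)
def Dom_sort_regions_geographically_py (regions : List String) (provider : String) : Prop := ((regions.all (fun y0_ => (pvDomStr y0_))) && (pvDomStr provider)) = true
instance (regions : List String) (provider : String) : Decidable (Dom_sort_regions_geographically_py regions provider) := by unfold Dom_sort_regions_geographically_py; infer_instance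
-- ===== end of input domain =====

-- B replaces A's per-group rescans of `regions` (with a linear `in sorted_regions` test)
-- by a precomputed region→group-rank dict and ONE pass over `regions` with a seen-set and
-- rank buckets; objective: faster (asymptotic).

-- the literal geographic-groups table both Pythons start from
def geoGroups : PySem.Dict String (PySem.Dict String (List String)) :=
  ⟨[("aws", ⟨[("us", ["us-east-1", "us-east-2", "us-west-1", "us-west-2"]),
              ("eu", ["eu-west-1", "eu-west-2", "eu-central-1"]),
              ("ap", ["ap-southeast-1", "ap-southeast-2", "ap-northeast-1"])]⟩),
    ("gcp", ⟨[("us", ["us-central1", "us-east1", "us-west1"]),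
              ("eu", ["europe-west1", "europe-west2", "europe-west3"]),
              ("asia", ["asia-southeast1", "asia-northeast1"])]⟩)]⟩

-- ===== PORT A =====
def sort_regions_geographically_py (regions : List String) (provider : String) : List String :=
  let provider_groups := geoGroups.getD provider PySem.Dict.empty
  let sorted_regions : List String :=
    provider_groups.values.foldl
      (fun acc group_regions =>
        regions.foldl
          (fun acc region =>
            if region ∈ group_regions ∧ region ∉ acc then acc ++ [region] else acc)
          acc)
      []
  regions.foldl (fun acc region => if region ∉ acc then acc ++ [region] else acc) sorted_regions

-- ===== PORT B =====
def sort_regions_geographically_py_alt (regions : List String) (provider : String) : List String :=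
  let groups := (geoGroups.getD provider PySem.Dict.empty).values
  let rank : PySem.Dict String Int :=
    (PySem.List.enumerate groups).foldl
      (fun d p => p.2.foldl (fun d r => d.insert r p.1) d) PySem.Dict.empty
  let nb : Int := PySem.List.len groups
  -- rank's values and nb are the nonnegative bucket indices 0..nb, so .toNat is exact
  let st := regions.foldl
    (fun (st : PySem.Set String × List (List String)) r =>
      if PySem.Set.contains st.1 r then st
      else
        let k := (rank.getD r nb).toNat
        (PySem.Set.add st.1 r, st.2.set k (st.2.getD k [] ++ [r])))
    (PySem.Set.empty, List.replicate (nb.toNat + 1) ([] : List String))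
  st.2.flatten

-- ===== PRECONDITION & SPEC =====
def Spec_sort_regions_geographically_py (regions : List String) (provider : String) (out : List String) : Prop := out = sort_regions_geographically_py_alt regions provider
instance (regions : List String) (provider : String) (out : List String) : Decidable (Spec_sort_regions_geographically_py regions provider out) := by unfold Spec_sort_regions_geographically_py; infer_instance

-- ===== CLAIM (what is proved, stated in full; the proofs are below) =====
def Claim_equal_sort_regions_geographically_py : Prop := ∀ (regions : List String) (provider : String), Dom_sort_regions_geographically_py regions provider → Spec_sort_regions_geographically_py regions provider (sort_regions_geographically_py regions provider)

-- ===== LEMMAS AND PROOFS =====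

-- first occurrences in l of elements satisfying p and not yet in seen, in order
def pick (p : String → Prop) [DecidablePred p] (seen : List String) : List String → List String
  | [] => []
  | x :: t => if p x ∧ x ∉ seen then x :: pick p (x :: seen) t else pick p seen t

theorem mem_pick (p : String → Prop) [DecidablePred p] :
    ∀ (l seen : List String) (x : String), x ∈ pick p seen l ↔ x ∈ l ∧ p x ∧ x ∉ seen := by
  intro l
  induction l with
  | nil => simp [pick]
  | cons a t ih =>
    intro seen x
    by_cases h : p a ∧ a ∉ seen
    · simp only [pick, if_pos h, List.mem_cons, ih]
      by_cases hx : x = a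
      · subst hx; simp [h.1, h.2]
      · simp [hx]
    · simp only [pick, if_neg h, ih, List.mem_cons]
      by_cases hx : x = a
      · subst hx; tauto
      · tauto

theorem pick_congr (p q : String → Prop) [DecidablePred p] [DecidablePred q] :
    ∀ (l s s' : List String),
      (∀ y ∈ l, (p y ∧ y ∉ s) ↔ (q y ∧ y ∉ s')) → pick p s l = pick q s' l := by
  intro l
  induction l with
  | nil => intro _ _ _; rfl
  | cons a t ih =>
    intro s s' h
    have ha := h a (by simp)
    by_cases hc : p a ∧ a ∉ s
    · have hc' : q a ∧ a ∉ s' := ha.mp hc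
      simp only [pick, if_pos hc, if_pos hc']
      refine congrArg _ (ih _ _ ?_)
      intro y hy
      have := h y (by simp [hy])
      constructor
      · rintro ⟨hp, hns⟩
        rw [List.mem_cons] at hns
        push Not at hns
        have := this.mp ⟨hp, hns.2⟩
        exact ⟨this.1, by simp [hns.1, this.2]⟩
      · rintro ⟨hq, hns⟩
        rw [List.mem_cons] at hns
        push Not at hns
        have := this.mpr ⟨hq, hns.2⟩
        exact ⟨this.1, by simp [hns.1, this.2]⟩
    · have hc' : ¬ (q a ∧ a ∉ s') := fun hq => hc (ha.mpr hq)
      simp only [pick, if_neg hc, if_neg hc']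
      exact ih _ _ (fun y hy => h y (by simp [hy]))

theorem foldA (p : String → Prop) [DecidablePred p] :
    ∀ (l acc : List String),
      l.foldl (fun a x => if p x ∧ x ∉ a then a ++ [x] else a) acc = acc ++ pick p acc l := by
  intro l
  induction l with
  | nil => simp [pick]
  | cons a t ih =>
    intro acc
    by_cases h : p a ∧ a ∉ acc
    · simp only [List.foldl_cons, if_pos h, pick, ih]
      rw [pick_congr p p t (acc ++ [a]) (a :: acc) (by intro y _; simp [List.mem_append]; tauto)]
      simp
    · simp only [List.foldl_cons, if_neg h, pick, ih]

theorem foldA' :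
    ∀ (l acc : List String),
      l.foldl (fun a x => if x ∉ a then a ++ [x] else a) acc
        = acc ++ pick (fun _ => True) acc l := by
  intro l acc
  have h : (fun (a : List String) x => if x ∉ a then a ++ [x] else a)
      = (fun a x => if (fun _ => True) x ∧ x ∉ a then a ++ [x] else a) := by
    funext a x; simp
  rw [h, foldA]

theorem map_getD_range (bs : List (List String)) (n : Nat) (h : bs.length = n) :
    (List.range n).map (fun k => bs.getD k []) = bs := by
  apply List.ext_getElem
  · simp [h]
  · intro i h1 h2
    simp [List.getD, List.getElem?_eq_getElem h2]

theorem foldB (idx : String → Nat) (nb : Nat) (hidx : ∀ x, idx x ≤ nb) :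
    ∀ (l : List String) (seen : PySem.Set String) (bs : List (List String)),
      bs.length = nb + 1 →
      (l.foldl
        (fun (st : PySem.Set String × List (List String)) r =>
          if PySem.Set.contains st.1 r then st
          else (PySem.Set.add st.1 r, st.2.set (idx r) (st.2.getD (idx r) [] ++ [r])))
        (seen, bs)).2
      = (List.range (nb + 1)).map (fun k => bs.getD k [] ++ pick (fun x => idx x = k) seen l) := by
  intro l
  induction l with
  | nil =>
    intro seen bs hlen
    simp only [List.foldl_nil, pick, List.append_nil]
    exact (map_getD_range bs _ hlen).symm
  | cons a t ih =>
    intro seen bs hlen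
    by_cases hmem : a ∈ seen
    · have hc : PySem.Set.contains seen a = true := by simp [PySem.Set.contains, hmem]
      simp only [List.foldl_cons, if_pos hc]
      rw [ih seen bs hlen]
      apply List.map_congr_left
      intro k _
      have : pick (fun x => idx x = k) seen (a :: t) = pick (fun x => idx x = k) seen t := by
        simp [pick, hmem]
      rw [this]
    · have hc : ¬ PySem.Set.contains seen a = true := by simp [PySem.Set.contains, hmem]
      simp only [List.foldl_cons, if_neg hc]
      rw [ih (PySem.Set.add seen a) _ (by simp [hlen])]
      apply List.map_congr_left
      intro k hk
      have hklt : k < nb + 1 := by simpa using List.mem_range.mp hk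
      have hia : idx a < bs.length := by rw [hlen]; exact Nat.lt_succ_of_le (hidx a)
      by_cases hk' : k = idx a
      · subst hk'
        have h1 : (bs.set (idx a) (bs.getD (idx a) [] ++ [a])).getD (idx a) []
            = bs.getD (idx a) [] ++ [a] := by
          simp [List.getD, hia]
        rw [h1]
        have h2 : pick (fun x => idx x = idx a) seen (a :: t)
            = a :: pick (fun x => idx x = idx a) (a :: seen) t := by
          simp [pick, hmem]
        rw [h2]
        have h3 : pick (fun x => idx x = idx a) (PySem.Set.add seen a) t
            = pick (fun x => idx x = idx a) (a :: seen) t := by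
          apply pick_congr
          intro y _
          have : y ∈ PySem.Set.add seen a ↔ y ∈ seen ∨ y = a := PySem.Set.mem_add seen a y
          simp [this]
          tauto
        rw [h3]
        simp
      · have h1 : (bs.set (idx a) (bs.getD (idx a) [] ++ [a])).getD k [] = bs.getD k [] := by
          simp [List.getD, List.getElem?_set_ne (fun h => hk' h.symm)]
        rw [h1]
        have h2 : pick (fun x => idx x = k) seen (a :: t)
            = pick (fun x => idx x = k) seen t := by
          simp [pick]
          intro he
          exact absurd he.symm hk'
        rw [h2]
        have h3 : pick (fun x => idx x = k) (PySem.Set.add seen a) t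
            = pick (fun x => idx x = k) seen t := by
          apply pick_congr
          intro y _
          have hy : y ∈ PySem.Set.add seen a ↔ y ∈ seen ∨ y = a := PySem.Set.mem_add seen a y
          constructor
          · rintro ⟨h4, h5⟩; exact ⟨h4, fun hys => h5 (hy.mpr (Or.inl hys))⟩
          · rintro ⟨h4, h5⟩
            refine ⟨h4, fun hys => ?_⟩
            rcases hy.mp hys with h6 | h6
            · exact h5 h6
            · subst h6; exact hk' h4.symm
        rw [h3]

-- A's four passes, written with pick, equal B's four buckets for any first-match index
theorem three_groups (g0 g1 g2 : List String) (idx : String → Nat)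
    (hidx : ∀ y, idx y = if y ∈ g0 then 0 else if y ∈ g1 then 1 else if y ∈ g2 then 2 else 3)
    (R : List String) :
    R.foldl (fun acc x => if x ∉ acc then acc ++ [x] else acc)
      (R.foldl (fun acc x => if x ∈ g2 ∧ x ∉ acc then acc ++ [x] else acc)
        (R.foldl (fun acc x => if x ∈ g1 ∧ x ∉ acc then acc ++ [x] else acc)
          (R.foldl (fun acc x => if x ∈ g0 ∧ x ∉ acc then acc ++ [x] else acc) [])))
    = pick (fun x => idx x = 0) [] R ++ (pick (fun x => idx x = 1) [] R
      ++ (pick (fun x => idx x = 2) [] R ++ pick (fun x => idx x = 3) [] R)) := by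
  rw [foldA (fun x => x ∈ g0) R [], foldA (fun x => x ∈ g1) R _, foldA (fun x => x ∈ g2) R _,
    foldA' R _]
  simp only [List.nil_append]
  have e0 : pick (fun x => x ∈ g0) [] R = pick (fun x => idx x = 0) [] R := by
    apply pick_congr
    intro y hy
    rw [hidx y]
    by_cases b0 : y ∈ g0 <;> simp [b0] <;> split_ifs <;> simp_all
  have e1 : pick (fun x => x ∈ g1) (pick (fun x => x ∈ g0) [] R) R
      = pick (fun x => idx x = 1) [] R := by
    apply pick_congr
    intro y hy
    rw [hidx y]
    have h0 := mem_pick (fun x => x ∈ g0) R [] y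
    by_cases b0 : y ∈ g0 <;> by_cases b1 : y ∈ g1 <;> simp_all <;> split_ifs <;> simp_all
  have e2 : pick (fun x => x ∈ g2)
        (pick (fun x => x ∈ g0) [] R ++ pick (fun x => x ∈ g1) (pick (fun x => x ∈ g0) [] R) R) R
      = pick (fun x => idx x = 2) [] R := by
    apply pick_congr
    intro y hy
    rw [hidx y]
    have h0 := mem_pick (fun x => x ∈ g0) R [] y
    have h1 := mem_pick (fun x => x ∈ g1) R (pick (fun x => x ∈ g0) [] R) y
    by_cases b0 : y ∈ g0 <;> by_cases b1 : y ∈ g1 <;> by_cases b2 : y ∈ g2 <;>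
      simp_all [List.mem_append]
  have e3 : pick (fun _ => True)
        ((pick (fun x => x ∈ g0) [] R ++ pick (fun x => x ∈ g1) (pick (fun x => x ∈ g0) [] R) R)
          ++ pick (fun x => x ∈ g2)
              (pick (fun x => x ∈ g0) [] R
                ++ pick (fun x => x ∈ g1) (pick (fun x => x ∈ g0) [] R) R) R) R
      = pick (fun x => idx x = 3) [] R := by
    apply pick_congr
    intro y hy
    rw [hidx y]
    have h0 := mem_pick (fun x => x ∈ g0) R [] y
    have h1 := mem_pick (fun x => x ∈ g1) R (pick (fun x => x ∈ g0) [] R) y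
    have h2 := mem_pick (fun x => x ∈ g2) R
      (pick (fun x => x ∈ g0) [] R ++ pick (fun x => x ∈ g1) (pick (fun x => x ∈ g0) [] R) R) y
    by_cases b0 : y ∈ g0 <;> by_cases b1 : y ∈ g1 <;> by_cases b2 : y ∈ g2 <;>
      simp_all [List.mem_append]
  rw [e3, e2, e1, e0]
  simp [List.append_assoc]

def g0a : List String := ["us-east-1", "us-east-2", "us-west-1", "us-west-2"]
def g1a : List String := ["eu-west-1", "eu-west-2", "eu-central-1"]
def g2a : List String := ["ap-southeast-1", "ap-southeast-2", "ap-northeast-1"]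
def g0g : List String := ["us-central1", "us-east1", "us-west1"]
def g1g : List String := ["europe-west1", "europe-west2", "europe-west3"]
def g2g : List String := ["asia-southeast1", "asia-northeast1"]

-- the rank dict B builds for provider "aws" (resp. "gcp"), as a literal
def rankAws : PySem.Dict String Int :=
  ⟨[("us-east-1",0),("us-east-2",0),("us-west-1",0),("us-west-2",0),
    ("eu-west-1",1),("eu-west-2",1),("eu-central-1",1),
    ("ap-southeast-1",2),("ap-southeast-2",2),("ap-northeast-1",2)]⟩
def rankGcp : PySem.Dict String Int :=
  ⟨[("us-central1",0),("us-east1",0),("us-west1",0),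
    ("europe-west1",1),("europe-west2",1),("europe-west3",1),
    ("asia-southeast1",2),("asia-northeast1",2)]⟩
def idxA (r : String) : Nat := (rankAws.getD r 3).toNat
def idxG (r : String) : Nat := (rankGcp.getD r 3).toNat

theorem idx_aws (y : String) :
    idxA y = if y ∈ g0a then 0 else if y ∈ g1a then 1 else if y ∈ g2a then 2 else 3 := by
  by_cases h0 : y ∈ g0a
  · fin_cases h0 <;> decide
  · by_cases h1 : y ∈ g1a
    · fin_cases h1 <;> simp_all <;> decide
    · by_cases h2 : y ∈ g2a
      · fin_cases h2 <;> simp_all <;> decide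
      · simp only [g0a, g1a, g2a, List.mem_cons, List.not_mem_nil] at h0 h1 h2
        push Not at h0 h1 h2
        have hb : ∀ (k : String), ¬ y = k → (k == y) = false := by
          intro k hk
          simp only [beq_eq_false_iff_ne, ne_eq]
          exact fun e => hk e.symm
        have hn : rankAws.get? y = none := by
          simp only [rankAws, PySem.Dict.get?_mk_cons, hb _ h0.1, hb _ h0.2.1, hb _ h0.2.2.1,
            hb _ h0.2.2.2.1, hb _ h1.1, hb _ h1.2.1, hb _ h1.2.2.1, hb _ h2.1, hb _ h2.2.1,
            hb _ h2.2.2.1, Bool.false_eq_true, if_false]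
          rfl
        simp [idxA, PySem.Dict.getD, hn, g0a, g1a, g2a, h0, h1, h2]

theorem idx_gcp (y : String) :
    idxG y = if y ∈ g0g then 0 else if y ∈ g1g then 1 else if y ∈ g2g then 2 else 3 := by
  by_cases h0 : y ∈ g0g
  · fin_cases h0 <;> decide
  · by_cases h1 : y ∈ g1g
    · fin_cases h1 <;> simp_all <;> decide
    · by_cases h2 : y ∈ g2g
      · fin_cases h2 <;> simp_all <;> decide
      · simp only [g0g, g1g, g2g, List.mem_cons, List.not_mem_nil] at h0 h1 h2
        push Not at h0 h1 h2
        have hb : ∀ (k : String), ¬ y = k → (k == y) = false := by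
          intro k hk
          simp only [beq_eq_false_iff_ne, ne_eq]
          exact fun e => hk e.symm
        have hn : rankGcp.get? y = none := by
          simp only [rankGcp, PySem.Dict.get?_mk_cons, hb _ h0.1, hb _ h0.2.1, hb _ h0.2.2.1,
            hb _ h1.1, hb _ h1.2.1, hb _ h1.2.2.1, hb _ h2.1, hb _ h2.2.1,
            Bool.false_eq_true, if_false]
          rfl
        simp [idxG, PySem.Dict.getD, hn, g0g, g1g, g2g, h0, h1, h2]

theorem aws_case (R : List String) :
    sort_regions_geographically_py R "aws" = sort_regions_geographically_py_alt R "aws" := by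
  have eA : sort_regions_geographically_py R "aws"
      = R.foldl (fun acc x => if x ∉ acc then acc ++ [x] else acc)
          (R.foldl (fun acc x => if x ∈ g2a ∧ x ∉ acc then acc ++ [x] else acc)
            (R.foldl (fun acc x => if x ∈ g1a ∧ x ∉ acc then acc ++ [x] else acc)
              (R.foldl (fun acc x => if x ∈ g0a ∧ x ∉ acc then acc ++ [x] else acc) []))) := rfl
  have eB : sort_regions_geographically_py_alt R "aws"
      = ((R.foldl (fun (st : PySem.Set String × List (List String)) r =>
          if PySem.Set.contains st.1 r then st
          else (PySem.Set.add st.1 r, st.2.set (idxA r) (st.2.getD (idxA r) [] ++ [r])))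
          (PySem.Set.empty, List.replicate 4 [])).2).flatten := rfl
  have hle : ∀ x, idxA x ≤ 3 := by
    intro x; rw [idx_aws x]; split_ifs <;> omega
  rw [eA, eB, foldB idxA 3 hle R PySem.Set.empty (List.replicate 4 []) (by simp),
    three_groups g0a g1a g2a idxA idx_aws R]
  show _ = (List.map _ [0, 1, 2, 3]).flatten
  simp [List.flatten, PySem.Set.empty]

theorem gcp_case (R : List String) :
    sort_regions_geographically_py R "gcp" = sort_regions_geographically_py_alt R "gcp" := by
  have eA : sort_regions_geographically_py R "gcp"
      = R.foldl (fun acc x => if x ∉ acc then acc ++ [x] else acc)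
          (R.foldl (fun acc x => if x ∈ g2g ∧ x ∉ acc then acc ++ [x] else acc)
            (R.foldl (fun acc x => if x ∈ g1g ∧ x ∉ acc then acc ++ [x] else acc)
              (R.foldl (fun acc x => if x ∈ g0g ∧ x ∉ acc then acc ++ [x] else acc) []))) := rfl
  have eB : sort_regions_geographically_py_alt R "gcp"
      = ((R.foldl (fun (st : PySem.Set String × List (List String)) r =>
          if PySem.Set.contains st.1 r then st
          else (PySem.Set.add st.1 r, st.2.set (idxG r) (st.2.getD (idxG r) [] ++ [r])))
          (PySem.Set.empty, List.replicate 4 [])).2).flatten := rfl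
  have hle : ∀ x, idxG x ≤ 3 := by
    intro x; rw [idx_gcp x]; split_ifs <;> omega
  rw [eA, eB, foldB idxG 3 hle R PySem.Set.empty (List.replicate 4 []) (by simp),
    three_groups g0g g1g g2g idxG idx_gcp R]
  show _ = (List.map _ [0, 1, 2, 3]).flatten
  simp [List.flatten, PySem.Set.empty]

theorem empty_case (R : List String) :
    R.foldl (fun acc x => if x ∉ acc then acc ++ [x] else acc) ([] : List String) =
    ((R.foldl (fun (st : PySem.Set String × List (List String)) r =>
        if PySem.Set.contains st.1 r then st
        else (PySem.Set.add st.1 r, st.2.set 0 (st.2.getD 0 [] ++ [r])))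
        (PySem.Set.empty, [[]])).2).flatten := by
  have hf := foldB (fun _ : String => 0) 0 (fun _ => le_refl 0) R PySem.Set.empty [[]] rfl
  simp only [] at hf
  rw [foldA' R [], hf]
  have hr : List.range (0 + 1) = [0] := rfl
  rw [hr]
  simp only [List.map_cons, List.map_nil, List.flatten_cons, List.flatten_nil, List.append_nil,
    List.nil_append, List.getD, List.getElem?_cons_zero, Option.getD_some]
  apply pick_congr
  intro y hy
  simp [PySem.Set.empty]

theorem default_case (R : List String) (provider : String)
    (hA : provider ≠ "aws") (hG : provider ≠ "gcp") :
    sort_regions_geographically_py R provider = sort_regions_geographically_py_alt R provider := by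
  have hb : ∀ (k : String), provider ≠ k → (k == provider) = false := by
    intro k hk
    simp only [beq_eq_false_iff_ne, ne_eq]
    exact fun e => hk e.symm
  have hg : geoGroups.get? provider = none := by
    simp only [geoGroups, PySem.Dict.get?_mk_cons, hb _ hA, hb _ hG, Bool.false_eq_true, if_false]
    rfl
  have hv : geoGroups.getD provider PySem.Dict.empty = PySem.Dict.empty := by
    simp [PySem.Dict.getD, hg]
  simp only [sort_regions_geographically_py, sort_regions_geographically_py_alt, hv]
  exact empty_case R

-- ===== VERDICT (by name: the statement is the Claim_ definition above) =====
theorem sort_regions_geographically_py_spec : Claim_equal_sort_regions_geographically_py := by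
  intro R provider _
  unfold Spec_sort_regions_geographically_py
  by_cases hA : provider = "aws"
  · subst hA; exact aws_case R
  · by_cases hG : provider = "gcp"
    · subst hG; exact gcp_case R
    · exact default_case R provider hA hG
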